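-- pv_equiv track=rewrite | github.com/cookieyu2000/Gene | ner/test.py | annotate_text
-- ===== SOURCE A (Python) =====
-- def annotate_text(tokens, labels):
--     annotated_text = []
--     entity = []
--     entity_label = None
--
--     for token, label in zip(tokens, labels):
--         if label != 'O':
--             if label.startswith('B-') or (label.startswith('I-') and entity_label is None):
--                 if entity:
--                     annotated_text.append(f"{''.join(entity)} ({entity_label})")
--                 entity = [token.replace("##", "")]
--                 entity_label = label[2:]
--             else:
--                 entity.append(token.replace("##", ""))
--         else:
--             if entity:
--                 annotated_text.append(f"{''.join(entity)} ({entity_label})")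
--                 entity = []
--                 entity_label = None
--             annotated_text.append(token.replace("##", ""))
--
--     if entity:
--         annotated_text.append(f"{''.join(entity)} ({entity_label})")
--
--     return ' '.join(annotated_text)
-- ===== SOURCE B (Python) =====
-- def _extends(lab, slab):
--     # a label continues the current span iff it is not 'O', not a 'B-' opener,
--     # and not an 'I-' while the span has no label (A reopens in that case)
--     return lab != 'O' and not lab.startswith('B-') and not (lab.startswith('I-') and slab is None)
--
--
-- def annotate_text(tokens, labels):
--     pairs = list(zip(tokens, labels))
--     n = len(pairs)
--     parts = []
--     i = 0
--     while i < n: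
--         tok, lab = pairs[i]
--         if lab == 'O':
--             parts.append(tok.replace("##", ""))
--             i += 1
--             continue
--         # open a span at i and look ahead for its maximal extent
--         slab = lab[2:] if lab.startswith(('B-', 'I-')) else None
--         j = i + 1
--         while j < n and _extends(pairs[j][1], slab):
--             j += 1
--         body = ''.join(t.replace("##", "") for t, _ in pairs[i:j])
--         parts.append(f"{body} ({slab})")
--         i = j
--     return ' '.join(parts)
-- ===== Notes on version B (the rewrite author's own statement) =====
-- stated objective: alternative
-- what changed: B replaces A's flat state machine (which threads an open-entity accumulator and label through every iteration and flushes it at boundaries) by a span scanner: an outer index loop that, at each non-O position, looks ahead with an inner loop to find the maximal extent of the span, renders pairs[i:j] at once and jumps i to j; no entity state is carried between outer iterations.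
import Mathlib
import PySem

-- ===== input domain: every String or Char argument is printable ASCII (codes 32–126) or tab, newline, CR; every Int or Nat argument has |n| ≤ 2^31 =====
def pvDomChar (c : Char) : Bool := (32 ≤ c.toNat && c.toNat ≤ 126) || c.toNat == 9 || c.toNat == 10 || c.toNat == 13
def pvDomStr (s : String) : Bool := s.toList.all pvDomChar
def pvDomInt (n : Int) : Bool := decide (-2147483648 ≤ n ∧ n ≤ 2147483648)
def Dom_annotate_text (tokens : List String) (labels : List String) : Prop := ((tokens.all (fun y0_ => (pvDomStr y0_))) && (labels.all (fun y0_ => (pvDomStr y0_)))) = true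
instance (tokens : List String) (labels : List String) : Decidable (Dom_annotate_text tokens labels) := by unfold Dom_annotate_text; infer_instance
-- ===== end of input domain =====

-- B scans spans by index lookahead (outer loop per segment, inner maximal-run scan, render at once)
-- instead of A's flat state machine carrying an open-entity accumulator; objective: alternative.


-- ===== PORT A =====
-- f"{''.join(entity)} ({entity_label})" — Python renders None as "None"
def fmtA (entity : List String) (entity_label : Option String) : String :=
  PySem.Str.join "" entity ++ " (" ++ (match entity_label with | none => "None" | some s => s) ++ ")"

-- one iteration of A's for-loop over (token, label); state = (annotated_text, entity, entity_label)
def stepA (st : List String × List String × Option String) (tl : String × String) :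
    List String × List String × Option String :=
  let (acc, entity, entity_label) := st
  let (token, label) := tl
  if label ≠ "O" then
    if PySem.Str.startswith label "B-" ||
       (PySem.Str.startswith label "I-" && entity_label.isNone) then
      let acc := if entity ≠ [] then acc ++ [fmtA entity entity_label] else acc
      (acc, [PySem.Str.replace token "##" ""], some (PySem.Str.slice label (some 2) none))
    else
      (acc, entity ++ [PySem.Str.replace token "##" ""], entity_label)
  else
    let (acc, entity, entity_label) :=
      if entity ≠ [] then (acc ++ [fmtA entity entity_label], ([] : List String), (none : Option String))
      else (acc, entity, entity_label)
    (acc ++ [PySem.Str.replace token "##" ""], entity, entity_label)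

def annotate_text (tokens : List String) (labels : List String) : String :=
  let (acc, entity, entity_label) := (tokens.zip labels).foldl stepA ([], [], none)
  let acc := if entity ≠ [] then acc ++ [fmtA entity entity_label] else acc
  PySem.Str.join " " acc

-- ===== PORT B =====
-- token.replace("##", "")
def cleanTok (t : String) : String := PySem.Str.replace t "##" ""

-- how Python's f-string renders the span label (None prints as "None")
def showLab : Option String → String
  | none => "None"
  | some s => s

-- the label a newly opened span gets: lab[2:] for B-/I- labels, None otherwise
def slabOf (lab : String) : Option String :=
  if PySem.Str.startswith lab "B-" || PySem.Str.startswith lab "I-"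
  then some (PySem.Str.slice lab (some 2) none) else none

-- B's inner-loop predicate: does label `lab` extend a span labelled `slab`?
def extendsLab (lab : String) (slab : Option String) : Bool :=
  lab ≠ "O" && !PySem.Str.startswith lab "B-" && !(PySem.Str.startswith lab "I-" && slab.isNone)

-- B's outer loop: consume one plain token or one maximal span per step (i jumps to j)
def goB : List (String × String) → List String
  | [] => []
  | (tok, lab) :: rest =>
    if lab = "O" then cleanTok tok :: goB rest
    else
      let slab := slabOf lab
      let run := rest.takeWhile (fun p => extendsLab p.2 slab)
      let rest' := rest.dropWhile (fun p => extendsLab p.2 slab)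
      (PySem.Str.join "" (((tok, lab) :: run).map (fun p => cleanTok p.1)) ++ " (" ++ showLab slab ++ ")")
        :: goB rest'
termination_by l => l.length
decreasing_by
  all_goals simp only [List.length_cons]
  · omega
  · exact Nat.lt_succ_of_le (List.length_dropWhile_le _ _)

def annotate_text_alt (tokens : List String) (labels : List String) : String :=
  PySem.Str.join " " (goB (tokens.zip labels))

-- ===== PRECONDITION & SPEC =====
def Spec_annotate_text (tokens : List String) (labels : List String) (out : String) : Prop := out = annotate_text_alt tokens labels
instance (tokens : List String) (labels : List String) (out : String) : Decidable (Spec_annotate_text tokens labels out) := by unfold Spec_annotate_text; infer_instance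

-- ===== CLAIM (what is proved, stated in full; the proofs are below) =====
def Claim_equal_annotate_text : Prop := ∀ (tokens : List String) (labels : List String), Dom_annotate_text tokens labels → Spec_annotate_text tokens labels (annotate_text tokens labels)

-- ===== LEMMAS AND PROOFS =====

-- A's post-loop flush
def finishA (st : List String × List String × Option String) : List String :=
  if st.2.1 ≠ [] then st.1 ++ [fmtA st.2.1 st.2.2] else st.1

theorem fmtA_show (e : List String) (l : Option String) :
    fmtA e l = PySem.Str.join "" e ++ " (" ++ showLab l ++ ")" := by
  cases l <;> rfl

theorem goB_nil : goB [] = [] := by rw [goB]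

theorem goB_cons_O (tok : String) (rest : List (String × String)) :
    goB ((tok, "O") :: rest) = cleanTok tok :: goB rest := by
  rw [goB]; simp

theorem goB_cons_ent (tok lab : String) (rest : List (String × String)) (h : lab ≠ "O") :
    goB ((tok, lab) :: rest) =
      (PySem.Str.join "" (((tok, lab) :: rest.takeWhile (fun p => extendsLab p.2 (slabOf lab))).map
          (fun p => cleanTok p.1)) ++ " (" ++ showLab (slabOf lab) ++ ")")
        :: goB (rest.dropWhile (fun p => extendsLab p.2 (slabOf lab))) := by
  rw [goB]; simp [h]

theorem slabOf_pos (lab : String)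
    (h : (PySem.Str.startswith lab "B-" || PySem.Str.startswith lab "I-") = true) :
    slabOf lab = some (PySem.Str.slice lab (some 2) none) := by
  unfold slabOf; rw [if_pos h]

theorem slabOf_neg (lab : String)
    (h : (PySem.Str.startswith lab "B-" || PySem.Str.startswith lab "I-") = false) :
    slabOf lab = none := by
  unfold slabOf; rw [if_neg (by rw [h]; exact Bool.false_ne_true)]

-- step-reduction lemmas for A's loop body
theorem stepA_O (acc entity : List String) (el : Option String) (token : String) :
    stepA (acc, entity, el) (token, "O") =
    ((if entity ≠ [] then acc ++ [fmtA entity el] else acc) ++ [cleanTok token],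
      (if entity ≠ [] then [] else entity), (if entity ≠ [] then none else el)) := by
  simp only [stepA, cleanTok]
  rw [if_neg (by simp)]
  split <;> simp_all

theorem stepA_open (acc entity : List String) (el : Option String) (token label : String)
    (h : label ≠ "O")
    (hc : (PySem.Str.startswith label "B-" || (PySem.Str.startswith label "I-" && el.isNone)) = true) :
    stepA (acc, entity, el) (token, label) =
    ((if entity ≠ [] then acc ++ [fmtA entity el] else acc), [cleanTok token],
      some (PySem.Str.slice label (some 2) none)) := by
  simp only [stepA, cleanTok]
  rw [if_pos h, if_pos hc]

theorem stepA_ext (acc entity : List String) (el : Option String) (token label : String)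
    (h : label ≠ "O")
    (hc : (PySem.Str.startswith label "B-" || (PySem.Str.startswith label "I-" && el.isNone)) = false) :
    stepA (acc, entity, el) (token, label) =
    (acc, entity ++ [cleanTok token], el) := by
  simp only [stepA, cleanTok]
  rw [if_pos h, if_neg (by rw [hc]; simp)]

-- main invariant, proved by strong induction on the list length:
-- (1) with no open span, A's flushed output is acc ++ B's segment list;
-- (2) with an open span (e, l), e ≠ [], A's flushed output is acc, then the span rendered
--     together with its maximal extension run, then B on the remainder.
theorem key : ∀ (n : Nat) (ps : List (String × String)), ps.length ≤ n →
    (∀ acc : List String, finishA (ps.foldl stepA (acc, [], none)) = acc ++ goB ps) ∧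
    (∀ (acc e : List String) (l : Option String), e ≠ [] →
      finishA (ps.foldl stepA (acc, e, l)) =
      acc ++ [PySem.Str.join "" (e ++ (ps.takeWhile (fun p => extendsLab p.2 l)).map (fun p => cleanTok p.1))
              ++ " (" ++ showLab l ++ ")"]
          ++ goB (ps.dropWhile (fun p => extendsLab p.2 l))) := by
  intro n
  induction n with
  | zero =>
    intro ps h
    have : ps = [] := List.length_eq_zero_iff.mp (Nat.le_zero.mp h)
    subst this
    constructor
    · intro acc; simp [finishA, goB_nil]
    · intro acc e l he
      simp [finishA, he, goB_nil, fmtA_show]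
  | succ n ih =>
    intro ps h
    cases ps with
    | nil =>
      constructor
      · intro acc; simp [finishA, goB_nil]
      · intro acc e l he
        simp [finishA, he, goB_nil, fmtA_show]
    | cons p rest =>
      obtain ⟨tok, lab⟩ := p
      have hr : rest.length ≤ n := by simp at h; omega
      constructor
      · -- (1) no open span at the head
        intro acc
        by_cases hO : lab = "O"
        · subst hO
          simp only [List.foldl, stepA_O]
          simp only [ne_eq, not_true_eq_false, if_false, ite_self]
          rw [(ih rest hr).1, goB_cons_O]
          simp
        · by_cases hbi : (PySem.Str.startswith lab "B-" || PySem.Str.startswith lab "I-") = true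
          · simp only [List.foldl]
            rw [stepA_open acc [] none tok lab hO (by rw [show (PySem.Str.startswith lab "I-" && (none : Option String).isNone) = PySem.Str.startswith lab "I-" by simp]; exact hbi)]
            simp only [ne_eq, not_true_eq_false, if_false]
            rw [(ih rest hr).2 acc [cleanTok tok] (some (PySem.Str.slice lab (some 2) none)) (by simp)]
            rw [goB_cons_ent tok lab rest hO]
            simp only [slabOf_pos lab hbi, showLab, List.map_cons, List.singleton_append]
            simp
          · have hbi' : (PySem.Str.startswith lab "B-" || PySem.Str.startswith lab "I-") = false :=
              Bool.not_eq_true _ |>.mp hbi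
            simp only [List.foldl]
            rw [stepA_ext acc [] none tok lab hO (by rw [show (PySem.Str.startswith lab "I-" && (none : Option String).isNone) = PySem.Str.startswith lab "I-" by simp]; exact hbi')]
            rw [List.nil_append]
            rw [(ih rest hr).2 acc [cleanTok tok] none (by simp)]
            rw [goB_cons_ent tok lab rest hO]
            simp only [slabOf_neg lab hbi', showLab, List.map_cons, List.singleton_append]
            simp
      · -- (2) open span (e, l) at the head
        intro acc e l he
        by_cases hx : extendsLab lab l = true
        · -- the head label extends the span
          have hx' := hx
          simp only [extendsLab, Bool.and_eq_true, Bool.not_eq_true', decide_eq_true_eq] at hx'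
          have h1 : lab ≠ "O" := hx'.1.1
          have h2 : (PySem.Str.startswith lab "B-" ||
              (PySem.Str.startswith lab "I-" && l.isNone)) = false := by
            rw [hx'.1.2, hx'.2]; rfl
          simp only [List.foldl]
          rw [stepA_ext acc e l tok lab h1 h2]
          rw [(ih rest hr).2 acc (e ++ [cleanTok tok]) l (by simp)]
          rw [List.takeWhile_cons_of_pos (by exact hx),
              List.dropWhile_cons_of_pos (by exact hx)]
          simp
        · -- the head label closes the span
          have hx' : extendsLab lab l = false := Bool.not_eq_true _ |>.mp hx
          rw [List.takeWhile_cons_of_neg (by simp [hx']),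
              List.dropWhile_cons_of_neg (by simp [hx'])]
          by_cases hO : lab = "O"
          · subst hO
            simp only [List.foldl, stepA_O]
            simp only [ne_eq, he, not_false_iff, if_true]
            rw [(ih rest hr).1, goB_cons_O]
            simp [fmtA_show]
          · -- closes by opening a new span: B- or (I- with unlabeled span)
            by_cases hB : PySem.Str.startswith lab "B-" = true
            · have h2 : (PySem.Str.startswith lab "B-" ||
                  (PySem.Str.startswith lab "I-" && l.isNone)) = true := by rw [hB]; rfl
              have hbi : (PySem.Str.startswith lab "B-" || PySem.Str.startswith lab "I-") = true := by
                rw [hB]; rfl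
              simp only [List.foldl]
              rw [stepA_open acc e l tok lab hO h2]
              simp only [ne_eq, he, not_false_iff, if_true]
              rw [(ih rest hr).2 (acc ++ [fmtA e l]) [cleanTok tok]
                    (some (PySem.Str.slice lab (some 2) none)) (by simp)]
              rw [goB_cons_ent tok lab rest hO]
              simp only [slabOf_pos lab hbi, showLab, List.map_cons, List.singleton_append]
              cases l <;> simp [fmtA_show, showLab]
            · have hBf : PySem.Str.startswith lab "B-" = false := Bool.not_eq_true _ |>.mp hB
              have hIN : (PySem.Str.startswith lab "I-" && l.isNone) = true := by
                by_cases hIN0 : (PySem.Str.startswith lab "I-" && l.isNone) = true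
                · exact hIN0
                · exfalso
                  apply hx
                  simp only [extendsLab, hBf, Bool.not_eq_true _ |>.mp hIN0]
                  simp [hO]
              have hi : PySem.Str.startswith lab "I-" = true := by
                revert hIN; cases PySem.Str.startswith lab "I-" <;> simp
              have h2 : (PySem.Str.startswith lab "B-" ||
                  (PySem.Str.startswith lab "I-" && l.isNone)) = true := by
                rw [hIN, Bool.or_true]
              have hbi : (PySem.Str.startswith lab "B-" || PySem.Str.startswith lab "I-") = true := by
                rw [hi, Bool.or_true]
              simp only [List.foldl]
              rw [stepA_open acc e l tok lab hO h2]
              simp only [ne_eq, he, not_false_iff, if_true]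
              rw [(ih rest hr).2 (acc ++ [fmtA e l]) [cleanTok tok]
                    (some (PySem.Str.slice lab (some 2) none)) (by simp)]
              rw [goB_cons_ent tok lab rest hO]
              simp only [slabOf_pos lab hbi, showLab, List.map_cons, List.singleton_append]
              cases l <;> simp [fmtA_show, showLab]

-- ===== VERDICT (by name: the statement is the Claim_ definition above) =====
theorem annotate_text_spec : Claim_equal_annotate_text := by
  intro tokens labels _
  unfold Spec_annotate_text annotate_text annotate_text_alt
  have := (key (tokens.zip labels).length (tokens.zip labels) le_rfl).1 []
  simp only [List.nil_append] at this
  rcases hfold : (tokens.zip labels).foldl stepA ([], [], none) with ⟨acc', e', l'⟩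
  rw [hfold] at this
  simp only [finishA] at this
  simp only [this]
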